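-- pv_equiv track=rewrite | github.com/LivellaStefano/progetto-bioinformatica | script.py | get_common_mutations_1
-- ===== SOURCE A (Python) =====
-- def get_common_mutations_1(genome_label, variants_dict, same):
--     valid = True
--     result = list()
--     for index in variants_dict[genome_label]:
--         valid = True
--         for genome in variants_dict:
--             # A => same
--             # B => index not in variants_dict[genome]
--             # C => variants_dict[genome_label][index] != variants_dict[genome][index]
--             # (not A and B) or (A and (B or C))
--             # (not A and B) or (A and B) or (A and C)
--             # (B and (not A or A)) or (A and C)
--             # B or (A and C)
--             if (index not in variants_dict[genome]) or\
--                 (same and (variants_dict[genome_label][index] != variants_dict[genome][index])):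
--                 valid = False
--                 break
--         if valid:
--             result.append(index)
--     return result
-- ===== SOURCE B (Python) =====
-- def get_common_mutations_1(genome_label, variants_dict, same):
--     base = variants_dict[genome_label]
--     common = set(base)
--     for table in variants_dict.values():
--         common &= {i for i in base
--                    if i in table and (not same or base[i] == table[i])}
--     return [i for i in base if i in common]
-- ===== Notes on version B (the rewrite author's own statement) =====
-- stated objective: simpler
-- what changed: B replaces A's per-index inner scan with early break (and its key-lookup of each genome) by a two-phase set computation: build one set of surviving indices per genome, intersect them all, then filter the label's keys by membership in the intersection.
import Mathlib
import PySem

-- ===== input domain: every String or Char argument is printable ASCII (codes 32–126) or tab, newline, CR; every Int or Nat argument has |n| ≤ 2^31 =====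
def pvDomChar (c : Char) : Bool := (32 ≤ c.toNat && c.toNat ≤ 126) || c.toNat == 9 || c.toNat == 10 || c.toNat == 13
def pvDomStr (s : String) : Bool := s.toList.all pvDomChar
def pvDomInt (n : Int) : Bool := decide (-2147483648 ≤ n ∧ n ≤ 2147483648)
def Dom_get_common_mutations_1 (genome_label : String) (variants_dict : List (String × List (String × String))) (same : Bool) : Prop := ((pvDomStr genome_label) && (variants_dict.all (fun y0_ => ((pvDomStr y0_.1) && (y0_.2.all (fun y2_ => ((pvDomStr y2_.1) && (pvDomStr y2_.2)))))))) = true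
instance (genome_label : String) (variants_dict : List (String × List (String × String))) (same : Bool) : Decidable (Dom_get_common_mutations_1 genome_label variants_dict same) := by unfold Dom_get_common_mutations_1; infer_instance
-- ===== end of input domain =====

-- B computes the surviving-index set of each genome once and intersects them, then filters the
-- label's keys by membership — a build-then-filter decomposition instead of A's per-index inner
-- scan with break; objective: simpler.

-- ===== PORT A =====
-- 'variants_dict[genome]' / 'variants_dict[genome_label]': first-match lookup; genome is always a
-- key (it is iterated from the dict), so the '.getD []' default is unreachable.
def pvBad (variants_dict : List (String × List (String × String))) (genome_label : String)
    (same : Bool) (index : String) (genome : String) : Bool :=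
  let table := (variants_dict.lookup genome).getD []
  (table.lookup index).isNone ||
    (same && !(((variants_dict.lookup genome_label).getD []).lookup index == table.lookup index))

-- inner 'for genome in variants_dict' with break: valid = false as soon as pvBad holds
def pvLoop (variants_dict : List (String × List (String × String))) (genome_label : String)
    (same : Bool) (index : String) : List (String × List (String × String)) → Bool
  | [] => true
  | p :: rest =>
    if pvBad variants_dict genome_label same index p.1 then false
    else pvLoop variants_dict genome_label same index rest

def get_common_mutations_1 (genome_label : String) (variants_dict : List (String × List (String × String))) (same : Bool) : List String :=
  -- 'variants_dict[genome_label]' raises KeyError when absent: excluded by Pre_; [] is arbitrary there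
  ((variants_dict.lookup genome_label).getD []).foldl
    (fun result p =>
      if pvLoop variants_dict genome_label same p.1 variants_dict then result ++ [p.1]
      else result) []

-- ===== PORT B =====
def get_common_mutations_1_alt (genome_label : String) (variants_dict : List (String × List (String × String))) (same : Bool) : List String :=
  let base := (variants_dict.lookup genome_label).getD []
  let common := variants_dict.foldl
    (fun common p =>
      PySem.Set.inter common (PySem.Set.ofList ((base.map Prod.fst).filter (fun i =>
        (p.2.lookup i).isSome && (!same || (base.lookup i == p.2.lookup i))))))
    (PySem.Set.ofList (base.map Prod.fst))
  (base.map Prod.fst).filter (fun i => PySem.Set.contains common i)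

-- ===== PRECONDITION & SPEC =====
-- genome_label must be a key (else A raises KeyError); distinct outer keys are automatic for any
-- input that is a Python dict (a dict cannot hold duplicate keys), so nothing representable is lost.
def Pre_get_common_mutations_1 (genome_label : String) (variants_dict : List (String × List (String × String))) (same : Bool) : Prop :=
  (variants_dict.lookup genome_label).isSome = true ∧ (variants_dict.map Prod.fst).Nodup
instance (genome_label : String) (variants_dict : List (String × List (String × String))) (same : Bool) : Decidable (Pre_get_common_mutations_1 genome_label variants_dict same) := by unfold Pre_get_common_mutations_1; infer_instance

def pvWitness_get_common_mutations_1 : String × (List (String × List (String × String))) × Bool :=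
  ("g", [("g", [("a", "p")]), ("h", [("a", "p"), ("b", "q")])], true)

def Spec_get_common_mutations_1 (genome_label : String) (variants_dict : List (String × List (String × String))) (same : Bool) (out : List String) : Prop := out = get_common_mutations_1_alt genome_label variants_dict same
instance (genome_label : String) (variants_dict : List (String × List (String × String))) (same : Bool) (out : List String) : Decidable (Spec_get_common_mutations_1 genome_label variants_dict same out) := by unfold Spec_get_common_mutations_1; infer_instance

-- ===== CLAIM (what is proved, stated in full; the proofs are below) =====
def Claim_equal_get_common_mutations_1 : Prop := ∀ (genome_label : String) (variants_dict : List (String × List (String × String))) (same : Bool), Dom_get_common_mutations_1 genome_label variants_dict same → Pre_get_common_mutations_1 genome_label variants_dict same → Spec_get_common_mutations_1 genome_label variants_dict same (get_common_mutations_1 genome_label variants_dict same)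

-- ===== LEMMAS AND PROOFS =====

-- A's inner loop with break is the 'all' of the negated break condition
theorem pvLoop_eq_all (vd : List (String × List (String × String))) (gl : String) (same : Bool)
    (i : String) (l : List (String × List (String × String))) :
    pvLoop vd gl same i l = l.all (fun p => !pvBad vd gl same i p.1) := by
  induction l with
  | nil => rfl
  | cons p rest ih =>
    simp only [pvLoop, List.all_cons, ih]
    by_cases h : pvBad vd gl same i p.1 = true <;> simp [h]

theorem lookup_self_of_nodup {β : Type} (vd : List (String × β))
    (hnd : (vd.map Prod.fst).Nodup) (p : String × β) (hp : p ∈ vd) :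
    vd.lookup p.1 = some p.2 := by
  induction vd with
  | nil => cases hp
  | cons q rest ih =>
    simp only [List.map_cons, List.nodup_cons] at hnd
    rcases List.mem_cons.mp hp with h | h
    · subst h; simp [List.lookup]
    · have hne : q.1 ≠ p.1 := by
        intro he
        exact hnd.1 (he ▸ List.mem_map_of_mem h)
      have hb : (p.1 == q.1) = false := by simpa using (Ne.symm hne)
      simp only [List.lookup, hb]
      exact ih hnd.2 h
    
theorem map_fst_filter (q : String → Bool) (b : List (String × String)) :
    (b.filter (fun p => q p.1)).map Prod.fst = (b.map Prod.fst).filter q :=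
  (List.filter_map (f := Prod.fst) (l := b) (p := q)).symm

-- A's break condition, negated, with 'variants_dict[genome]' resolved to the entry's own table
theorem bad_iff (gl : String) (vd : List (String × List (String × String))) (same : Bool)
    (i : String) (hnd : (vd.map Prod.fst).Nodup) (p : String × List (String × String))
    (hp : p ∈ vd) :
    (!pvBad vd gl same i p.1)
      = ((p.2.lookup i).isSome && (!same || (((vd.lookup gl).getD []).lookup i == p.2.lookup i))) := by
  simp only [pvBad, lookup_self_of_nodup vd hnd p hp, Option.getD_some]
  cases h : List.lookup i p.2 <;> cases same <;> simp_all

-- membership in B's intersection fold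
theorem mem_foldl_inter (f : (String × List (String × String)) → List String)
    (l : List (String × List (String × String))) (s : PySem.Set String) (i : String) :
    (i ∈ l.foldl (fun c p => PySem.Set.inter c (PySem.Set.ofList (f p))) s)
      ↔ i ∈ s ∧ ∀ p ∈ l, i ∈ f p := by
  induction l generalizing s with
  | nil => simp
  | cons p rest ih =>
    simp [List.foldl_cons, ih, PySem.Set.mem_inter, PySem.Set.mem_ofList, and_assoc]

-- ===== VERDICT (by name: the statement is the Claim_ definition above) =====
theorem get_common_mutations_1_spec : Claim_equal_get_common_mutations_1 := by
  intro gl vd same _ hpre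
  unfold Spec_get_common_mutations_1 get_common_mutations_1 get_common_mutations_1_alt
  rw [PySem.List.foldl_append_if, List.nil_append]
  rw [map_fst_filter (fun i => pvLoop vd gl same i vd)]
  apply List.filter_congr
  intro i hi
  rw [Bool.eq_iff_iff]
  simp only [pvLoop_eq_all, List.all_eq_true, PySem.Set.contains_iff, mem_foldl_inter,
    PySem.Set.mem_ofList, List.mem_filter]
  constructor
  · intro h
    exact ⟨hi, fun p hp => ⟨hi, by rw [← bad_iff gl vd same i hpre.2 p hp]; exact h p hp⟩⟩
  · intro h p hp
    rw [bad_iff gl vd same i hpre.2 p hp]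
    exact (h.2 p hp).2
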